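-- pv_equiv track=rewrite | github.com/EdOoO21/codes-python | ege/23 задания/08 06 23.py | f
-- ===== SOURCE A (Python) =====
-- def f(x, y):
--     if x < y:
--         return 0
--     if x == y:
--         return 1
--     if x > y:
--         h = 0
--         for i in str(x):
--             h += int(i)
--         return f(x // 2, y) + f(x - 1, y) + f(x - h, y)
-- ===== SOURCE B (Python) =====
-- def f(x, y):
--     if x < y:
--         return 0
--     dp = {y: 1}
--     for v in range(y + 1, x + 1):
--         h = 0
--         for d in str(v):
--             h += int(d)
--         dp[v] = dp.get(v // 2, 0) + dp.get(v - 1, 0) + dp.get(v - h, 0)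
--     return dp[x]
-- ===== Notes on version B (the rewrite author's own statement) =====
-- stated objective: alternative
-- what changed: Replaced the exponential triple recursion with a bottom-up dynamic program that fills a dictionary dp[v] for v = y..x, computing each state once.
import Mathlib
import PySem

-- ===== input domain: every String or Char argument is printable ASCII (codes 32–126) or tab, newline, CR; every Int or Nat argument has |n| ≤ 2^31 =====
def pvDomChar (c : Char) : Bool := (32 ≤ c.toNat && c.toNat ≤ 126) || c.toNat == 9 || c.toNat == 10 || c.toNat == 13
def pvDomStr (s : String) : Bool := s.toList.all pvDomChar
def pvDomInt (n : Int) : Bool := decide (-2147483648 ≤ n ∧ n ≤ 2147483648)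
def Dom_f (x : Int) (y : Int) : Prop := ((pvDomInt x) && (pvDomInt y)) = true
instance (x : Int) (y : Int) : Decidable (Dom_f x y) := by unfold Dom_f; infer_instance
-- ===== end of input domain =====

-- B replaces A's triple recursion by a bottom-up DP filling dp[v] for v = y..x, computing each state once.

-- ===== PORT A =====
-- digit sum "h = 0; for i in str(x): h += int(i)" (B's "for d in str(v): h += int(d)" is the same loop);
-- int(i) raises ValueError on the '-' character (only reachable for x < 0, outside Pre_f): ofChars? is none there, ported as .getD 0
def pyDigitSum (x : Int) : Int :=
  (PySem.Int.toChars x).foldl (fun h c => h + (PySem.Int.ofChars? [c]).getD 0) 0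

-- A's recursion, made total with fuel ((x-y).toNat + 1 is enough depth on Pre_f; outside Pre_f Python recurses forever / raises)
def fAux : Nat → Int → Int → Int
  | 0, _, _ => 0
  | n + 1, x, y =>
    if x < y then 0
    else if x = y then 1
    else fAux n (PySem.Int.floordiv x 2) y + fAux n (x - 1) y + fAux n (x - pyDigitSum x) y

def f (x : Int) (y : Int) : Int := fAux ((x - y).toNat + 1) x y

-- ===== PORT B =====
-- dp[v] = dp.get(v//2, 0) + dp.get(v-1, 0) + dp.get(v-h, 0)
def fStep (dp : PySem.Dict Int Int) (v : Int) : PySem.Dict Int Int :=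
  dp.insert v (dp.getD (PySem.Int.floordiv v 2) 0 + dp.getD (v - 1) 0 + dp.getD (v - pyDigitSum v) 0)

def f_alt (x : Int) (y : Int) : Int :=
  if x < y then 0
  else
    let dp := (PySem.List.pyRange (y + 1) (x + 1) 1).foldl fStep (PySem.Dict.empty.insert y 1)
    -- dp[x]: the key x is always present here (x ≥ y), so .getD 0 is exact
    (dp.get? x).getD 0

-- ===== PRECONDITION & SPEC =====
-- Pre_f is exactly where Python A returns: for y < 0 < x - y the recursion reaches f(0, y), where h = 0 and
-- f(0 // 2, y) = f(0, y) recurses forever (RecursionError); for x < 0 with y ≤ x, int('-') raises ValueError.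
def Pre_f (x : Int) (y : Int) : Prop := x ≤ y ∨ 0 ≤ y
instance (x : Int) (y : Int) : Decidable (Pre_f x y) := by unfold Pre_f; infer_instance
def pvWitness_f : Int × Int := (10, 2)

def Spec_f (x : Int) (y : Int) (out : Int) : Prop := out = f_alt x y
instance (x : Int) (y : Int) (out : Int) : Decidable (Spec_f x y out) := by unfold Spec_f; infer_instance

-- ===== CLAIM (what is proved, stated in full; the proofs are below) =====
def Claim_equal_f : Prop := ∀ (x : Int) (y : Int), Dom_f x y → Pre_f x y → Spec_f x y (f x y)

-- ===== LEMMAS AND PROOFS =====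

-- mathematical decimal digit sum, for reasoning about pyDigitSum
def dsN (m : Nat) : Int :=
  if m < 10 then (m : Int) else (m % 10 : Int) + dsN (m / 10)
decreasing_by omega

theorem dsN_pos (m : Nat) (hm : 1 ≤ m) : 1 ≤ dsN m := by
  induction m using Nat.strong_induction_on with
  | _ m ih =>
    rw [dsN]
    split_ifs with h
    · exact_mod_cast hm
    · have h1 : 1 ≤ m / 10 := by omega
      have := ih (m / 10) (by omega) h1
      have : (0 : Int) ≤ (m % 10 : Nat) := Int.natCast_nonneg _
      omega

theorem val_digitChar (d : Nat) (hd : d < 10) :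
    (PySem.Int.ofChars? [Nat.digitChar d]).getD 0 = (d : Int) := by
  interval_cases d <;> decide

theorem core_sum : ∀ (fl n : Nat) (acc : List Char), n < fl →
    ((Nat.toDigitsCore 10 fl n acc).map (fun c => (PySem.Int.ofChars? [c]).getD 0)).sum
      = dsN n + ((acc.map (fun c => (PySem.Int.ofChars? [c]).getD 0)).sum) := by
  intro fl
  induction fl with
  | zero => intro n acc h; omega
  | succ fl ih =>
    intro n acc h
    rw [Nat.toDigitsCore]
    by_cases h0 : n / 10 = 0
    · rw [if_pos h0]
      simp only [List.map_cons, List.sum_cons]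
      rw [val_digitChar (n % 10) (by omega), dsN, if_pos (by omega),
        Nat.mod_eq_of_lt (by omega)]
    · rw [if_neg h0]
      have hlt2 : n / 10 < fl := by omega
      rw [ih (n / 10) ((n % 10).digitChar :: acc) hlt2]
      simp only [List.map_cons, List.sum_cons]
      rw [val_digitChar (n % 10) (by omega)]
      have hds : dsN n = ((n % 10 : Nat) : Int) + dsN (n / 10) := by
        rw [dsN, if_neg (by omega)]
        push_cast
        ring
      rw [hds]
      ring

theorem pyDigitSum_eq (x : Int) (hx : 0 ≤ x) : pyDigitSum x = dsN x.toNat := by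
  unfold pyDigitSum PySem.Int.toChars
  rw [if_neg (by omega)]
  rw [PySem.List.foldl_add]
  unfold Nat.toDigits
  rw [core_sum (x.toNat + 1) x.toNat [] (by omega)]
  simp

theorem pyDigitSum_pos (x : Int) (hx : 1 ≤ x) : 1 ≤ pyDigitSum x := by
  rw [pyDigitSum_eq x (by omega)]
  exact dsN_pos x.toNat (by omega)

theorem floordiv_two_le (x : Int) (hx : 1 ≤ x) : PySem.Int.floordiv x 2 ≤ x - 1 := by
  rw [PySem.Int.floordiv_eq_ediv_of_pos (by omega)]
  omega

theorem fAux_congr : ∀ (n : Nat) (m : Nat) (x y : Int), 0 ≤ y →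
    (x - y).toNat < n → (x - y).toNat < m → fAux n x y = fAux m x y := by
  intro n
  induction n with
  | zero => intro m x y _ hn _; omega
  | succ n ih =>
    intro m x y hy hn hm
    match m with
    | 0 => omega
    | m + 1 =>
      by_cases hlt : x < y
      · simp [fAux, hlt]
      by_cases heq : x = y
      · simp [fAux, heq]
      have hyx : y < x := by omega
      have hx1 : 1 ≤ x := by omega
      have hdiv := floordiv_two_le x hx1
      have hdig := pyDigitSum_pos x hx1
      simp only [fAux, if_neg hlt, if_neg heq]
      rw [ih m (PySem.Int.floordiv x 2) y hy (by omega) (by omega),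
          ih m (x - 1) y hy (by omega) (by omega),
          ih m (x - pyDigitSum x) y hy (by omega) (by omega)]

theorem fAux_succ (n : Nat) (x y : Int) : fAux (n + 1) x y =
    (if x < y then 0
     else if x = y then 1
     else fAux n (PySem.Int.floordiv x 2) y + fAux n (x - 1) y + fAux n (x - pyDigitSum x) y) := rfl

theorem f_of_lt (x y : Int) (h : x < y) : f x y = 0 := by
  simp [f, fAux, h]

theorem f_of_eq (y : Int) : f y y = 1 := by
  simp [f, fAux]

theorem f_recur (x y : Int) (hy : 0 ≤ y) (hyx : y < x) :
    f x y = f (PySem.Int.floordiv x 2) y + f (x - 1) y + f (x - pyDigitSum x) y := by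
  have hx1 : 1 ≤ x := by omega
  have hdiv := floordiv_two_le x hx1
  have hdig := pyDigitSum_pos x hx1
  have hn : (x - y).toNat + 1 = ((x - y).toNat - 1) + 1 + 1 := by omega
  unfold f
  rw [hn, fAux_succ, if_neg (by omega : ¬ x < y), if_neg (by omega : ¬ x = y)]
  rw [fAux_congr ((x - y).toNat - 1 + 1) ((PySem.Int.floordiv x 2 - y).toNat + 1)
        (PySem.Int.floordiv x 2) y hy (by omega) (by omega),
      fAux_congr ((x - y).toNat - 1 + 1) ((x - 1 - y).toNat + 1) (x - 1) y hy (by omega) (by omega),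
      fAux_congr ((x - y).toNat - 1 + 1) ((x - pyDigitSum x - y).toNat + 1)
        (x - pyDigitSum x) y hy (by omega) (by omega)]

-- the dictionary after k iterations of B's loop
def dpD (y : Int) (k : Nat) : PySem.Dict Int Int :=
  (PySem.List.pyRange (y + 1) (y + 1 + k) 1).foldl fStep (PySem.Dict.empty.insert y 1)

theorem dp_inv (y : Int) (hy : 0 ≤ y) : ∀ (k : Nat) (u : Int),
    (dpD y k).get? u = if y ≤ u ∧ u < y + 1 + k then some (f u y) else none := by
  intro k
  induction k with
  | zero =>
    intro u
    unfold dpD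
    rw [PySem.List.pyRange_one]
    have : (y + 1 + (0 : Nat) - (y + 1)).toNat = 0 := by omega
    rw [this]
    simp only [List.range_zero, List.map_nil, List.foldl_nil]
    rw [PySem.Dict.get?_insert]
    split_ifs with h1 h2 h2
    · rw [h1, f_of_eq]
    · omega
    · omega
    · exact PySem.Dict.get?_empty u
  | succ k ih =>
    intro u
    have hv : (0:Int) ≤ y + 1 + k := by omega
    have hrange : PySem.List.pyRange (y + 1) (y + 1 + (k + 1 : Nat)) 1
        = PySem.List.pyRange (y + 1) (y + 1 + k) 1 ++ [y + 1 + k] := by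
      have h1 : (y + 1 + (k + 1 : Nat) : Int) = (y + 1 + k) + 1 := by push_cast; ring
      rw [h1, PySem.List.pyRange_one_succ_right (by omega)]
    have hstep : dpD y (k + 1) = fStep (dpD y k) (y + 1 + k) := by
      unfold dpD
      rw [hrange, List.foldl_append]
      rfl
    set v : Int := y + 1 + k with hvdef
    have hgetD : ∀ w : Int, w < v → (dpD y k).getD w 0 = f w y := by
      intro w hw
      rw [PySem.Dict.getD_eq_get?_getD, ih w]
      split_ifs with h
      · rfl
      · have : w < y := by omega
        rw [f_of_lt w y this]
        rfl
    have hv1 : (1:Int) ≤ v := by omega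
    have hval : (dpD y k).getD (PySem.Int.floordiv v 2) 0 + (dpD y k).getD (v - 1) 0
        + (dpD y k).getD (v - pyDigitSum v) 0 = f v y := by
      rw [hgetD _ (by have := floordiv_two_le v hv1; omega),
          hgetD _ (by omega),
          hgetD _ (by have := pyDigitSum_pos v hv1; omega)]
      exact (f_recur v y hy (by omega)).symm
    rw [hstep]
    unfold fStep
    rw [PySem.Dict.get?_insert, ih u]
    split_ifs with h1 h2 h2 <;> try rfl
    · rw [h1, hval]
    · omega
    · omega
    · omega

-- ===== VERDICT (by name: the statement is the Claim_ definition above) =====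
theorem f_spec : Claim_equal_f := by
  unfold Claim_equal_f
  intro x y _ hpre
  unfold Spec_f f_alt
  by_cases hlt : x < y
  · rw [if_pos hlt, f_of_lt x y hlt]
  rw [if_neg hlt]
  rcases hpre with hxy | hy
  · -- x ≤ y and ¬ x < y: x = y (covers y < 0)
    have hx : x = y := le_antisymm hxy (by omega)
    subst hx
    rw [PySem.List.pyRange_one]
    have : (x + 1 - (x + 1)).toNat = 0 := by omega
    rw [this]
    simp only [List.range_zero, List.map_nil, List.foldl_nil]
    rw [PySem.Dict.get?_insert, if_pos rfl, f_of_eq]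
    rfl
  · -- 0 ≤ y ≤ x: the loop is dpD y (x - y).toNat
    have hk : (x + 1 : Int) = y + 1 + ((x - y).toNat : Int) := by omega
    have hfold : (PySem.List.pyRange (y + 1) (x + 1) 1).foldl fStep (PySem.Dict.empty.insert y 1)
        = dpD y (x - y).toNat := by
      unfold dpD; rw [hk]
    rw [hfold]
    show f x y = ((dpD y (x - y).toNat).get? x).getD 0
    rw [dp_inv y hy (x - y).toNat x, if_pos (by constructor <;> omega)]
    rfl
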